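-- pv_equiv track=rewrite | github.com/shevchukstasa/moonjar-pms | business/services/material_matcher.py | _guess_material_type
-- ===== SOURCE A (Python) =====
-- def _guess_material_type(translated_name: str) -> str:
--     """
--     Guess MaterialType enum value from translated name.
--
--     Matches against: stone, pigment, frit, oxide_carbonate,
--     other_bulk, packaging, consumable, other.
--     """
--     lower = translated_name.lower()
--
--     if any(w in lower for w in (
--         "stone", "tile", "ceramic", "sink", "table top", "countertop", "basin",
--         "porcelain", "marble", "granite", "andesite", "basalt",
--         "terrazzo", "travertine", "onyx", "limestone", "sandstone",
--     )):
--         return "stone"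
--     if "frit" in lower:
--         return "frit"
--     if any(w in lower for w in ("pigment", "colorant")):
--         return "pigment"
--     if any(w in lower for w in ("oxide", "carbonate", "nitrate", "sulfate", "hydroxide")):
--         return "oxide_carbonate"
--     if any(w in lower for w in ("glaze", "engobe")):
--         return "other_bulk"
--     if any(w in lower for w in (
--         "box", "carton", "plastic", "tape", "label", "pallet",
--         "bubble", "foam", "styrofoam", "stretch", "rope", "raffia",
--         "staples", "nails", "corner protector", "sticker",
--     )):
--         return "packaging"
--     if any(w in lower for w in (
--         "kaolin", "bentonite", "silica", "clay", "feldspar",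
--         "quartz", "dolomite", "talc", "wollastonite", "alumina",
--         "zircon", "calcium", "cement", "gypsum",
--     )):
--         return "other_bulk"
--     if any(w in lower for w in (
--         "sandpaper", "knife", "scissors", "gloves", "mask",
--         "brush", "sponge", "sieve", "cloth", "bucket", "hose", "pump",
--         "glue", "epoxy", "resin", "wax",
--     )):
--         return "consumable"
--
--     return "other"
-- ===== SOURCE B (Python) =====
-- # Alternative algorithm: instead of an ordered short-circuit if-chain, build a
-- # flat keyword index mapping each keyword to (priority, material_type), collect
-- # ALL matching keywords in one pass, and select the winner by min priority.
-- _GROUPS = [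
--     ("stone", ("stone", "tile", "ceramic", "sink", "table top", "countertop",
--                "basin", "porcelain", "marble", "granite", "andesite", "basalt",
--                "terrazzo", "travertine", "onyx", "limestone", "sandstone")),
--     ("frit", ("frit",)),
--     ("pigment", ("pigment", "colorant")),
--     ("oxide_carbonate", ("oxide", "carbonate", "nitrate", "sulfate", "hydroxide")),
--     ("other_bulk", ("glaze", "engobe")),
--     ("packaging", ("box", "carton", "plastic", "tape", "label", "pallet",
--                    "bubble", "foam", "styrofoam", "stretch", "rope", "raffia",
--                    "staples", "nails", "corner protector", "sticker")),
--     ("other_bulk", ("kaolin", "bentonite", "silica", "clay", "feldspar",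
--                     "quartz", "dolomite", "talc", "wollastonite", "alumina",
--                     "zircon", "calcium", "cement", "gypsum")),
--     ("consumable", ("sandpaper", "knife", "scissors", "gloves", "mask",
--                     "brush", "sponge", "sieve", "cloth", "bucket", "hose",
--                     "pump", "glue", "epoxy", "resin", "wax")),
-- ]
--
-- _KEYWORD_INDEX = {}
-- for _prio, (_mtype, _kws) in enumerate(_GROUPS):
--     for _kw in _kws:
--         _KEYWORD_INDEX[_kw] = (_prio, _mtype)
--
--
-- def _guess_material_type(translated_name: str) -> str:
--     lower = translated_name.lower()
--     hits = [pt for kw, pt in _KEYWORD_INDEX.items() if kw in lower]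
--     if not hits:
--         return "other"
--     return min(hits)[1]
-- ===== Notes on version B (the rewrite author's own statement) =====
-- stated objective: alternative
-- what changed: Replaces the ordered short-circuit if-chain by a flat keyword->(priority,type) index: B collects ALL matching keywords in one pass and selects the result by minimum priority, instead of testing groups one by one with early return.
import Mathlib
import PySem

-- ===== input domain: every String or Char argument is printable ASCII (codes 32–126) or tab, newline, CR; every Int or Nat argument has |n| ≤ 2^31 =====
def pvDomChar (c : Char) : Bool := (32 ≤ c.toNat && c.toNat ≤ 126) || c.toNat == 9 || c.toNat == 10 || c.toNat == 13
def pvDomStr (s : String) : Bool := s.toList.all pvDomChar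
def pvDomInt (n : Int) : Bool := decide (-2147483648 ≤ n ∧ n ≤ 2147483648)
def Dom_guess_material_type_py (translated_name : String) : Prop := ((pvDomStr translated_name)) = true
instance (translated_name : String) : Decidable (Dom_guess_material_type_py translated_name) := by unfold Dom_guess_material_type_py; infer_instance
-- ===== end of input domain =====

-- B replaces A's ordered short-circuit if-chain by a flat keyword->(priority,type)
-- index: collect all matching keywords, then select by minimum priority (alternative).

-- ===== PORT A =====
def guess_material_type_py (translated_name : String) : String :=
  let lower := PySem.Str.lower translated_name
  if ["stone", "tile", "ceramic", "sink", "table top", "countertop", "basin", "porcelain", "marble", "granite", "andesite", "basalt", "terrazzo", "travertine", "onyx", "limestone", "sandstone"].any (fun w => PySem.Str.isIn w lower) then "stone"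
  else if PySem.Str.isIn "frit" lower then "frit"
  else if ["pigment", "colorant"].any (fun w => PySem.Str.isIn w lower) then "pigment"
  else if ["oxide", "carbonate", "nitrate", "sulfate", "hydroxide"].any (fun w => PySem.Str.isIn w lower) then "oxide_carbonate"
  else if ["glaze", "engobe"].any (fun w => PySem.Str.isIn w lower) then "other_bulk"
  else if ["box", "carton", "plastic", "tape", "label", "pallet", "bubble", "foam", "styrofoam", "stretch", "rope", "raffia", "staples", "nails", "corner protector", "sticker"].any (fun w => PySem.Str.isIn w lower) then "packaging"
  else if ["kaolin", "bentonite", "silica", "clay", "feldspar", "quartz", "dolomite", "talc", "wollastonite", "alumina", "zircon", "calcium", "cement", "gypsum"].any (fun w => PySem.Str.isIn w lower) then "other_bulk"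
  else if ["sandpaper", "knife", "scissors", "gloves", "mask", "brush", "sponge", "sieve", "cloth", "bucket", "hose", "pump", "glue", "epoxy", "resin", "wax"].any (fun w => PySem.Str.isIn w lower) then "consumable"
  else "other"

-- ===== PORT B =====
-- Source B's _GROUPS table
def pvGroups : List (String × List String) :=
  [("stone", ["stone", "tile", "ceramic", "sink", "table top", "countertop", "basin", "porcelain", "marble", "granite", "andesite", "basalt", "terrazzo", "travertine", "onyx", "limestone", "sandstone"]),
   ("frit", ["frit"]),
   ("pigment", ["pigment", "colorant"]),
   ("oxide_carbonate", ["oxide", "carbonate", "nitrate", "sulfate", "hydroxide"]),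
   ("other_bulk", ["glaze", "engobe"]),
   ("packaging", ["box", "carton", "plastic", "tape", "label", "pallet", "bubble", "foam", "styrofoam", "stretch", "rope", "raffia", "staples", "nails", "corner protector", "sticker"]),
   ("other_bulk", ["kaolin", "bentonite", "silica", "clay", "feldspar", "quartz", "dolomite", "talc", "wollastonite", "alumina", "zircon", "calcium", "cement", "gypsum"]),
   ("consumable", ["sandpaper", "knife", "scissors", "gloves", "mask", "brush", "sponge", "sieve", "cloth", "bucket", "hose", "pump", "glue", "epoxy", "resin", "wax"])]

-- Source B's module-level loop building _KEYWORD_INDEX (keys are all distinct, so the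
-- dict's items in insertion order are exactly this flat keyword list)
def pvFlat : Nat → List (String × List String) → List (String × Nat × String)
  | _, [] => []
  | n, (t, kws) :: rest => kws.map (fun kw => (kw, (n, t))) ++ pvFlat (n + 1) rest

def pvKeywordIndex : List (String × Nat × String) := pvFlat 0 pvGroups

-- Python's lexicographic tuple '<' on (prio, type)
def pvLt (a b : Nat × String) : Bool := a.1 < b.1 || (a.1 == b.1 && decide (a.2 < b.2))

-- min(hits): Python's min keeps the FIRST minimal element (replace only on strictly smaller)
def pvPyMin : List (Nat × String) → Option (Nat × String)
  | [] => none
  | x :: xs => some (xs.foldl (fun a b => if pvLt b a then b else a) x)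

-- the comprehension '[pt for kw, pt in _KEYWORD_INDEX.items() if kw in lower]'
def pvHits (lower : String) (items : List (String × Nat × String)) : List (Nat × String) :=
  items.filterMap (fun p => if PySem.Str.isIn p.1 lower then some p.2 else none)

def guess_material_type_py_alt (translated_name : String) : String :=
  let lower := PySem.Str.lower translated_name
  let hits := pvHits lower pvKeywordIndex
  match pvPyMin hits with
  | none => "other"
  | some m => m.2

-- ===== PRECONDITION & SPEC =====
def Spec_guess_material_type_py (translated_name : String) (out : String) : Prop := out = guess_material_type_py_alt translated_name
instance (translated_name : String) (out : String) : Decidable (Spec_guess_material_type_py translated_name out) := by unfold Spec_guess_material_type_py; infer_instance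

-- ===== CLAIM (what is proved, stated in full; the proofs are below) =====
def Claim_equal_guess_material_type_py : Prop := ∀ (translated_name : String), Dom_guess_material_type_py translated_name → Spec_guess_material_type_py translated_name (guess_material_type_py translated_name)

-- ===== LEMMAS AND PROOFS =====

-- first group (from index n) with a matching keyword, as A's chain computes it
def pvFirstHit (lower : String) : Nat → List (String × List String) → Option (Nat × String)
  | _, [] => none
  | n, (t, kws) :: rest =>
      if kws.any (fun w => PySem.Str.isIn w lower) then some (n, t)
      else pvFirstHit lower (n + 1) rest

theorem pvHits_append (lower : String) (xs ys : List (String × Nat × String)) :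
    pvHits lower (xs ++ ys) = pvHits lower xs ++ pvHits lower ys := by
  simp [pvHits]

theorem pvHits_block (lower t : String) (n : Nat) (kws : List String) :
    pvHits lower (kws.map (fun kw => (kw, (n, t)))) =
      (kws.filter (fun w => PySem.Str.isIn w lower)).map (fun _ => (n, t)) := by
  induction kws with
  | nil => rfl
  | cons k ks ih =>
      simp only [List.map_cons, pvHits, List.filterMap_cons, List.filter_cons]
      split <;> simp_all [pvHits]

theorem pvHits_flat_fst_le (lower : String) (groups : List (String × List String)) (n : Nat) :
    ∀ p ∈ pvHits lower (pvFlat n groups), n ≤ p.1 := by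
  induction groups generalizing n with
  | nil => simp [pvFlat, pvHits]
  | cons g rest ih =>
      intro p hp
      obtain ⟨t, kws⟩ := g
      rw [pvFlat, pvHits_append, pvHits_block] at hp
      rcases List.mem_append.1 hp with h | h
      · obtain ⟨w, _, rfl⟩ := List.mem_map.1 h; exact le_refl n
      · exact Nat.le_of_succ_le (ih (n + 1) p h)

theorem pvFoldl_min_stay (a : Nat × String) (l : List (Nat × String))
    (h : ∀ b ∈ l, pvLt b a = false) :
    l.foldl (fun a b => if pvLt b a then b else a) a = a := by
  induction l with
  | nil => rfl
  | cons x xs ih =>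
      simp only [List.foldl_cons, h x (List.mem_cons_self)]
      exact ih (fun b hb => h b (List.mem_cons_of_mem _ hb))

theorem pvLt_self (a : Nat × String) : pvLt a a = false := by
  simp [pvLt]

theorem pvPyMin_hits_eq_firstHit (lower : String) (groups : List (String × List String)) (n : Nat) :
    pvPyMin (pvHits lower (pvFlat n groups)) = pvFirstHit lower n groups := by
  induction groups generalizing n with
  | nil => rfl
  | cons g rest ih =>
      obtain ⟨t, kws⟩ := g
      rw [pvFlat, pvHits_append, pvHits_block, pvFirstHit]
      by_cases hm : kws.any (fun w => PySem.Str.isIn w lower) = true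
      · -- block hits nonempty: the min fold stays at (n, t)
        simp only [hm, if_pos]
        obtain ⟨w, ws, hcons⟩ : ∃ w ws, kws.filter (fun w => PySem.Str.isIn w lower) = w :: ws := by
          rcases h : kws.filter (fun w => PySem.Str.isIn w lower) with _ | ⟨w, ws⟩
          · rw [List.any_eq_true] at hm
            obtain ⟨x, hx, hxin⟩ := hm
            have : x ∈ kws.filter (fun w => PySem.Str.isIn w lower) :=
              List.mem_filter.2 ⟨hx, hxin⟩
            rw [h] at this
            simp at this
          · exact ⟨w, ws, rfl⟩
        rw [hcons]
        simp only [List.map_cons, List.cons_append, pvPyMin, Option.some.injEq]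
        apply pvFoldl_min_stay
        intro b hb
        rcases List.mem_append.1 hb with h | h
        · obtain ⟨x, _, rfl⟩ := List.mem_map.1 h; exact pvLt_self _
        · have := pvHits_flat_fst_le lower rest (n + 1) b h
          simp only [pvLt, Bool.or_eq_false_iff]
          constructor
          · simp only [decide_eq_false_iff_not]; omega
          · simp only [Bool.and_eq_false_iff]; left
            simp only [beq_eq_false_iff_ne]; omega
      · -- no keyword of this group matches: the block contributes nothing
        have hf : kws.filter (fun w => PySem.Str.isIn w lower) = [] := by
          rw [List.filter_eq_nil_iff]
          intro x hx
          rw [List.any_eq_true] at hm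
          simp only [Bool.not_eq_true]
          by_contra hc
          exact hm ⟨x, hx, by simpa using hc⟩
        simp only [hm, if_neg, Bool.false_eq_true, not_false_iff, hf, List.map_nil,
          List.nil_append]
        exact ih (n + 1)

-- ===== VERDICT (by name: the statement is the Claim_ definition above) =====
theorem guess_material_type_py_spec : Claim_equal_guess_material_type_py := by
  intro s _
  unfold Spec_guess_material_type_py guess_material_type_py guess_material_type_py_alt pvKeywordIndex
  simp only [pvPyMin_hits_eq_firstHit, pvGroups, pvFirstHit, List.any_cons, List.any_nil,
    Bool.or_false]
  split_ifs <;> rfl
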